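-- pv_equiv track=rewrite | github.com/tacular-omics/tacular | data_gen/generator/utils.py | format_composition_string
-- ===== SOURCE A (Python) =====
-- def format_composition_string(composition: dict[str, int]) -> str:
--     """Format composition as a string like C2H3NO"""
--     if not composition:
--         return ""
--
--     # Sort by elements using Hill system (C, H, then alphabetical)
--     parts: list[str] = []
--     elements = list(composition.keys())
--     elements.sort(key=lambda el: (0, el) if el == "C" else (1, el) if el == "H" else (2, el))
--     for element in elements:
--         count = composition[element]
--         parts.append(f"{element}{count if count != 1 else ''}")
--     return "".join(parts)
-- ===== SOURCE B (Python) =====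
-- def format_composition_string(composition: dict[str, int]) -> str:
--     """Format composition as a string like C2H3NO (Hill order: C, H, then alphabetical)."""
--     remaining = list(composition)
--     out = ""
--     while remaining:
--         el = min(remaining, key=lambda e: (e != "C", e != "H", e))
--         remaining.remove(el)
--         count = composition[el]
--         out += el if count == 1 else f"{el}{count}"
--     return out
-- ===== Notes on version B (the rewrite author's own statement) =====
-- stated objective: alternative
-- what changed: B never sorts and builds no parts list: a while loop repeatedly selects the Hill-least remaining key with min(), removes it, and appends its formatted piece directly to the output string (selection-by-extraction fused with formatting, instead of A's keyed sort pass followed by a format-and-join pass).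
import Mathlib
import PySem

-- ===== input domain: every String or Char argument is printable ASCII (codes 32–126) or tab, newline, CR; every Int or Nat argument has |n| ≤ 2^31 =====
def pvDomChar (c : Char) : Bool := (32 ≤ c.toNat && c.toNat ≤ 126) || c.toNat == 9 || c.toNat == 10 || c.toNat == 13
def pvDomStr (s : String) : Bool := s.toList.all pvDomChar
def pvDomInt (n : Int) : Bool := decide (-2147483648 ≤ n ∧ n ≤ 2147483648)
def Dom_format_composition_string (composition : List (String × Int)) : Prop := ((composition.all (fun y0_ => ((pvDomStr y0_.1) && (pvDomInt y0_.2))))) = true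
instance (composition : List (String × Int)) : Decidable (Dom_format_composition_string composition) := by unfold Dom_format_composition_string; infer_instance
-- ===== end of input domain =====

-- B replaces A's keyed sort + format-and-join passes by one while loop that repeatedly extracts
-- the Hill-least remaining key with min() and appends its formatted piece to the output string
-- (selection by extraction, fused with formatting); same return value (objective: alternative).

-- shared dict primitive both Pythons evaluate verbatim: composition[el]
-- (first-match lookup per the association-list convention; both programs only look up present keys)
def pvLookup (composition : List (String × Int)) (k : String) : Int :=
  match composition with
  | [] => 0
  | (a, v) :: rest => if a == k then v else pvLookup rest k

-- ===== PORT A =====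
-- first component of A's sort key (0, el) / (1, el) / (2, el)
def pvHillClass (el : String) : Int := if el == "C" then 0 else if el == "H" then 1 else 2

-- A's f-string f"{element}{count if count != 1 else ''}"
def pvFmtA (composition : List (String × Int)) (el : String) : String :=
  PySem.Str.join "" [el, if pvLookup composition el ≠ 1 then PySem.Int.toStr (pvLookup composition el) else ""]

def format_composition_string (composition : List (String × Int)) : String :=
  if composition.isEmpty then ""
  else
    let elements := PySem.List.dedup (composition.map (·.1))
    let elements := PySem.List.sorted2 elements pvHillClass (fun el => el)
    let parts := elements.foldl (fun parts element => parts ++ [pvFmtA composition element]) ([] : List String)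
    PySem.Str.join "" parts

-- ===== PORT B =====
-- B's min() key (e != "C", e != "H", e): a Python 3-tuple compared lexicographically
def pvMinKey (el : String) : Lex (Bool × Lex (Bool × String)) :=
  toLex (el != "C", toLex (el != "H", el))

-- B's piece: el if count == 1 else f"{el}{count}"
def pvFmtB (composition : List (String × Int)) (el : String) : String :=
  if pvLookup composition el == 1 then el
  else PySem.Str.join "" [el, PySem.Int.toStr (pvLookup composition el)]

-- B's while loop: select the min-key element, remove it, append its piece to out
def pvAltLoop (composition : List (String × Int)) (remaining : List String) (out : String) : String :=
  match h : PySem.List.min? remaining pvMinKey with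
  | none => out
  | some el =>
      pvAltLoop composition ((PySem.List.remove? remaining el).getD remaining)
        (PySem.Str.join "" [out, pvFmtB composition el])
termination_by remaining.length
decreasing_by
  have hm : el ∈ remaining := PySem.List.min?_mem h
  rw [PySem.List.remove?_eq_some_erase _ _ hm]
  simp only [Option.getD_some, List.length_erase_of_mem hm]
  exact Nat.sub_lt (List.length_pos_of_mem hm) Nat.one_pos

def format_composition_string_alt (composition : List (String × Int)) : String :=
  pvAltLoop composition (PySem.List.dedup (composition.map (·.1))) ""

-- ===== PRECONDITION & SPEC =====
def Spec_format_composition_string (composition : List (String × Int)) (out : String) : Prop := out = format_composition_string_alt composition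
instance (composition : List (String × Int)) (out : String) : Decidable (Spec_format_composition_string composition out) := by unfold Spec_format_composition_string; infer_instance

-- ===== CLAIM (what is proved, stated in full; the proofs are below) =====
def Claim_equal_format_composition_string : Prop := ∀ (composition : List (String × Int)), Dom_format_composition_string composition → Spec_format_composition_string composition (format_composition_string composition)

-- ===== LEMMAS AND PROOFS =====

-- joining with "" is concatenation
lemma join_nil_eq_flatten (l : List (List Char)) : PySem.Chars.join [] l = l.flatten := by
  induction l with
  | nil => rfl
  | cons x xs ih =>
      simp [PySem.Chars.join, List.intercalate] at *
      induction xs <;> simp_all [List.intersperse]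

-- fold a binary join into the head of a join list
lemma join_join_cons (a b : String) (l : List String) :
    PySem.Str.join "" (PySem.Str.join "" [a, b] :: l) = PySem.Str.join "" (a :: b :: l) := by
  apply String.toList_inj.mp
  simp [join_nil_eq_flatten]

lemma join_empty_head (l : List String) :
    PySem.Str.join "" ("" :: l) = PySem.Str.join "" l := by
  apply String.toList_inj.mp
  simp [join_nil_eq_flatten]

-- the two f-string helpers format identically
lemma fmtB_eq_fmtA (composition : List (String × Int)) (el : String) :
    pvFmtB composition el = pvFmtA composition el := by
  unfold pvFmtA pvFmtB
  by_cases h : pvLookup composition el = 1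
  · simp only [h, beq_self_eq_true, if_true, ne_eq, not_true_eq_false, if_false]
    apply String.toList_inj.mp
    simp [join_nil_eq_flatten]
  · simp [h]

-- equation lemmas for the two well-founded loops
lemma altLoop_none (comp : List (String × Int)) (rem : List String) (out : String)
    (h : PySem.List.min? rem pvMinKey = none) : pvAltLoop comp rem out = out := by
  rw [pvAltLoop]; split <;> simp_all

lemma altLoop_some (comp : List (String × Int)) (rem : List String) (out : String) (el : String)
    (h : PySem.List.min? rem pvMinKey = some el) :
    pvAltLoop comp rem out = pvAltLoop comp (rem.erase el) (PySem.Str.join "" [out, pvFmtB comp el]) := by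
  rw [pvAltLoop]; split
  · simp_all
  · rename_i el' heq
    rw [h] at heq
    cases heq
    rw [PySem.List.remove?_eq_some_erase _ _ (PySem.List.min?_mem h), Option.getD_some]

-- the order of keys B's selection loop extracts
def pvSelOrder (remaining : List String) : List String :=
  match h : PySem.List.min? remaining pvMinKey with
  | none => []
  | some el => el :: pvSelOrder (remaining.erase el)
termination_by remaining.length
decreasing_by
  have hm : el ∈ remaining := PySem.List.min?_mem h
  rw [List.length_erase_of_mem hm]
  exact Nat.sub_lt (List.length_pos_of_mem hm) Nat.one_pos

lemma selOrder_none (rem : List String) (h : PySem.List.min? rem pvMinKey = none) :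
    pvSelOrder rem = [] := by
  rw [pvSelOrder]; split <;> simp_all

lemma selOrder_some (rem : List String) (el : String) (h : PySem.List.min? rem pvMinKey = some el) :
    pvSelOrder rem = el :: pvSelOrder (rem.erase el) := by
  rw [pvSelOrder]; split <;> simp_all

-- the loop equals joining out with the pieces of the selection order
lemma altLoop_eq (composition : List (String × Int)) (remaining : List String) (out : String) :
    pvAltLoop composition remaining out
      = PySem.Str.join "" (out :: (pvSelOrder remaining).map (pvFmtB composition)) := by
  induction remaining using pvSelOrder.induct generalizing out with
  | case1 rem h =>
      rw [altLoop_none _ _ _ h, selOrder_none _ h]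
      apply String.toList_inj.mp
      simp
  | case2 rem el h ih =>
      rw [altLoop_some _ _ _ _ h, selOrder_some _ _ h, ih, List.map_cons]
      exact join_join_cons _ _ _

-- B's min key is injective
lemma pvMinKey_inj : Function.Injective pvMinKey := by
  intro a b h
  unfold pvMinKey at h
  have h2 := congrArg (fun p => (ofLex (ofLex p).2).2) h
  simpa using h2

-- selection order is a permutation of the input
lemma selOrder_perm (remaining : List String) : (pvSelOrder remaining).Perm remaining := by
  induction remaining using pvSelOrder.induct with
  | case1 rem h =>
      rw [selOrder_none _ h, (PySem.List.min?_eq_none_iff _ _).mp h]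
  | case2 rem el h ih =>
      rw [selOrder_some _ _ h]
      exact ((ih.cons el).trans (List.perm_cons_erase (PySem.List.min?_mem h)).symm)

-- selection order is strictly increasing in B's key (on a duplicate-free input)
lemma selOrder_pairwise (remaining : List String) (hnd : remaining.Nodup) :
    (pvSelOrder remaining).Pairwise (fun a b => pvMinKey a < pvMinKey b) := by
  induction remaining using pvSelOrder.induct with
  | case1 rem h =>
      rw [selOrder_none _ h]
      exact List.Pairwise.nil
  | case2 rem el h ih =>
      rw [selOrder_some _ _ h]
      refine List.pairwise_cons.mpr ⟨?_, ih (hnd.erase el)⟩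
      intro y hy
      have hy' : y ∈ rem.erase el := (selOrder_perm _).mem_iff.mp hy
      have hne : y ≠ el := (hnd.mem_erase_iff.mp hy').1
      have hle := PySem.List.min?_isMin h y (List.mem_of_mem_erase hy')
      exact lt_of_le_of_ne hle (fun he => hne (pvMinKey_inj he).symm)

-- B's key and A's lexicographic sort key induce the same strict order
lemma key_lt_iff (a b : String) :
    pvMinKey a < pvMinKey b ↔ (toLex (pvHillClass a, a) : Lex (Int × String)) < toLex (pvHillClass b, b) := by
  unfold pvMinKey pvHillClass
  by_cases ha : a = "C" <;> by_cases hb : b = "C" <;>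
    by_cases ha2 : a = "H" <;> by_cases hb2 : b = "H" <;>
    simp_all [Prod.Lex.toLex_lt_toLex, Bool.lt_iff, bne]

-- A's tuple-keyed sort is the single-keyed sort under the lexicographic key
lemma sorted2_eq_lex (xs : List String) :
    PySem.List.sorted2 xs pvHillClass (fun el => el)
      = PySem.List.sorted xs (fun el => toLex (pvHillClass el, el)) := by
  have hfun : (fun (a b : String) => decide (pvHillClass a < pvHillClass b) || (!decide (pvHillClass b < pvHillClass a) && decide (a < b)))
      = (fun (a b : String) => decide (toLex (pvHillClass a, a) < toLex (pvHillClass b, b))) := by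
    funext a b
    simp only [Prod.Lex.toLex_lt_toLex]
    by_cases h1 : pvHillClass a < pvHillClass b <;> by_cases h2 : pvHillClass b < pvHillClass a
    · omega
    all_goals simp [h1, h2]
    all_goals (intros; omega)
  rw [PySem.List.sorted_eq_foldl_insertBy]
  simp only [PySem.List.sorted2]
  simp only [show (false = true) = False by simp, if_false]
  rw [hfun]

-- hence A's sorted key order IS B's selection order
lemma selOrder_eq_sorted (keys : List String) (hnd : keys.Nodup) :
    PySem.List.sorted2 keys pvHillClass (fun el => el) = pvSelOrder keys := by
  rw [sorted2_eq_lex]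
  refine PySem.List.sorted_eq_of_perm_of_pairwise_lt _ _ _ (selOrder_perm keys) ?_
  exact (selOrder_pairwise keys hnd).imp (fun h => (key_lt_iff _ _).mp h)

-- ===== VERDICT (by name: the statement is the Claim_ definition above) =====
theorem format_composition_string_spec : Claim_equal_format_composition_string := by
  intro composition _
  unfold Spec_format_composition_string format_composition_string format_composition_string_alt
  rw [altLoop_eq, ← selOrder_eq_sorted _ (PySem.List.nodup_dedup _), join_empty_head]
  by_cases h : composition.isEmpty
  · rw [List.isEmpty_iff] at h
    subst h
    apply String.toList_inj.mp
    simp [PySem.List.dedup, PySem.List.sorted2]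
  · simp only [h, Bool.false_eq_true, if_false]
    rw [PySem.List.foldl_append_singleton_eq_map]
    simp only [List.nil_append]
    congr 1
    exact (List.map_congr_left (fun x _ => fmtB_eq_fmtA composition x)).symm
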